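-- pv_equiv track=rewrite | github.com/dikwickley/xamplan | app.py | sortTopics
-- ===== SOURCE A (Python) =====
-- def sortTopics(topics):
-- 	hard = []
-- 	med = []
-- 	easy = []
-- 	for topic_code in topics:
-- 		if topic_code[-1] == 'h':
-- 			hard.append([topic_code,'P'])
-- 		elif topic_code[-1] == 'm':
-- 			med.append([topic_code,'P'])
-- 		else:
-- 			easy.append([topic_code,'P'])
-- 	return [hard,med,easy]
-- ===== SOURCE B (Python) =====
-- def sortTopics(topics):
-- 	hard = [[t, 'P'] for t in topics if t[-1] == 'h']
-- 	med = [[t, 'P'] for t in topics if t[-1] == 'm']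
-- 	easy = [[t, 'P'] for t in topics if t[-1] not in ('h', 'm')]
-- 	return [hard, med, easy]
-- ===== Notes on version B (the rewrite author's own statement) =====
-- stated objective: alternative
-- what changed: Replaces the single accumulating loop with three branches by three independent filtered list comprehensions, one scan of topics per bucket.
import Mathlib
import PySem

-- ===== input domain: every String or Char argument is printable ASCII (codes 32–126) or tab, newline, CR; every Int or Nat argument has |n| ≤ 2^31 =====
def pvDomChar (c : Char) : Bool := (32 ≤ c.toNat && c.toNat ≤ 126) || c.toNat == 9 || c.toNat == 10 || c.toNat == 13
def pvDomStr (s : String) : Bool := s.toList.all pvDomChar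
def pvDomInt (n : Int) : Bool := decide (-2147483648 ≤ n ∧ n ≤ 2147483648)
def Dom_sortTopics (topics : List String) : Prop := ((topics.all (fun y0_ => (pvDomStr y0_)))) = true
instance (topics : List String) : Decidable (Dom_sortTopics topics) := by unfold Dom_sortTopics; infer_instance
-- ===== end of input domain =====

-- B replaces A's single partitioning loop by three independent filtered scans of `topics` (objective: alternative).
-- Pre_ excludes lists containing the empty string, on which both Pythons raise IndexError at topic_code[-1].


-- last character of topic_code (topic_code[-1]); default is never reached under Pre_ (no empty strings)
def pvLast (t : String) : Char := (PySem.Str.pyGet? t (-1)).getD ' '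

-- ===== PORT A =====
def sortTopics (topics : List String) : List (List (List String)) :=
  let s := topics.foldl
    (fun (st : List (List String) × List (List String) × List (List String)) tc =>
      if pvLast tc == 'h' then (st.1 ++ [[tc, "P"]], st.2.1, st.2.2)
      else if pvLast tc == 'm' then (st.1, st.2.1 ++ [[tc, "P"]], st.2.2)
      else (st.1, st.2.1, st.2.2 ++ [[tc, "P"]]))
    ([], [], [])
  [s.1, s.2.1, s.2.2]

-- ===== PORT B =====
def sortTopics_alt (topics : List String) : List (List (List String)) :=
  let hard := (topics.filter (fun t => pvLast t == 'h')).map (fun t => [t, "P"])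
  let med := (topics.filter (fun t => pvLast t == 'm')).map (fun t => [t, "P"])
  let easy := (topics.filter (fun t => !(pvLast t == 'h' || pvLast t == 'm'))).map (fun t => [t, "P"])
  [hard, med, easy]

-- ===== PRECONDITION & SPEC =====
-- Pre_ excludes lists containing the empty string: there both A and B raise IndexError (topic_code[-1]).
def Pre_sortTopics (topics : List String) : Prop := ∀ t ∈ topics, t ≠ ""
instance (topics : List String) : Decidable (Pre_sortTopics topics) := by unfold Pre_sortTopics; infer_instance
def pvWitness_sortTopics : List String := ["ah", "bm", "c"]

def Spec_sortTopics (topics : List String) (out : List (List (List String))) : Prop := out = sortTopics_alt topics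
instance (topics : List String) (out : List (List (List String))) : Decidable (Spec_sortTopics topics out) := by unfold Spec_sortTopics; infer_instance

-- ===== CLAIM (what is proved, stated in full; the proofs are below) =====
def Claim_equal_sortTopics : Prop := ∀ (topics : List String), Dom_sortTopics topics → Pre_sortTopics topics → Spec_sortTopics topics (sortTopics topics)

-- ===== LEMMAS AND PROOFS =====
theorem sortTopics_foldl (ts : List String)
    (h m e : List (List String)) :
    ts.foldl
      (fun (st : List (List String) × List (List String) × List (List String)) tc =>
        if pvLast tc == 'h' then (st.1 ++ [[tc, "P"]], st.2.1, st.2.2)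
        else if pvLast tc == 'm' then (st.1, st.2.1 ++ [[tc, "P"]], st.2.2)
        else (st.1, st.2.1, st.2.2 ++ [[tc, "P"]]))
      (h, m, e)
    = (h ++ (ts.filter (fun t => pvLast t == 'h')).map (fun t => [t, "P"]),
       m ++ (ts.filter (fun t => pvLast t == 'm')).map (fun t => [t, "P"]),
       e ++ (ts.filter (fun t => !(pvLast t == 'h' || pvLast t == 'm'))).map (fun t => [t, "P"])) := by
  induction ts generalizing h m e with
  | nil => simp
  | cons t ts ih =>
    simp only [List.foldl_cons, List.filter_cons]
    by_cases hh : pvLast t == 'h'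
    · rw [if_pos hh, ih]
      have h' : pvLast t = 'h' := by simpa using hh
      simp [h']
    · by_cases hm : pvLast t == 'm'
      · rw [if_neg hh, if_pos hm, ih]
        have h' : pvLast t = 'm' := by simpa using hm
        simp [h']
      · rw [if_neg hh, if_neg hm, ih]
        simp [hh, hm]

-- ===== VERDICT (by name: the statement is the Claim_ definition above) =====
theorem sortTopics_spec : Claim_equal_sortTopics := by
  intro topics _ _
  unfold Spec_sortTopics sortTopics sortTopics_alt
  rw [sortTopics_foldl]
  simp
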